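-- pv_equiv track=rewrite | github.com/xuhuasheng/huawei-jikao | 23.删除字符串中出现次数最少的字符.py | func
-- ===== SOURCE A (Python) =====
-- def func(ss):
--     s = list(ss)
--     d = {}
--     for i in s:
--         if i not in d:
--             d[i] = 1
--         else:
--             d[i] += 1
--     min_cnt = min(d.values())
--     res = []
--     for i in s:
--         if d[i] != min_cnt:
--             res.append(i)
--     return ''.join(res)
-- ===== SOURCE B (Python) =====
-- def func(ss):
--     # sort-then-scan: run-length encode the sorted characters, find the
--     # shortest run, collect its characters, filter the original string
--     runs = []
--     for c in sorted(ss):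
--         if runs and runs[0][0] == c:
--             runs[0] = (c, runs[0][1] + 1)
--         else:
--             runs.insert(0, (c, 1))
--     min_cnt = min(n for _, n in runs)  # ValueError on empty string, like A
--     rare = {c for c, n in runs if n == min_cnt}
--     return ''.join(c for c in ss if c not in rare)
-- ===== Notes on version B (the rewrite author's own statement) =====
-- stated objective: alternative
-- what changed: B replaces A's hash-table tabulation with a sort-then-scan algorithm: it run-length encodes sorted(ss), takes the shortest run length as the minimum count, collects the characters of the shortest runs into a set, and filters ss by set membership.
import Mathlib
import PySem

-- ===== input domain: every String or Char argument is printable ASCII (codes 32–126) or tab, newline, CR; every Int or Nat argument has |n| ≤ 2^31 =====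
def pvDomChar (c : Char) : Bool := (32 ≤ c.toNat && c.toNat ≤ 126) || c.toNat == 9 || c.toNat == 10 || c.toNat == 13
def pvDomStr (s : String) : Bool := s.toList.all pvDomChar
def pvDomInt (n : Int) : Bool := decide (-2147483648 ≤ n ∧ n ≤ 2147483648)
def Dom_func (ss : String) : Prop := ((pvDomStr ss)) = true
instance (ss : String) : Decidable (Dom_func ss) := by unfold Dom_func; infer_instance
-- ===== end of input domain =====

-- B replaces A's hash-table tabulation with sort-then-scan: it run-length encodes sorted(ss),
-- takes the shortest run length as the minimum count, collects the characters of the shortest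
-- runs into a set, and filters ss by set membership; same return value.

-- ===== PORT A =====
def func (ss : String) : String :=
  let s := ss.toList
  let d := s.foldl
    (fun d i => if d.contains i then d.insert i (d.getD i 0 + 1) else d.insert i 1)
    (PySem.Dict.empty : PySem.Dict Char Int)
  -- min(d.values()) raises ValueError on an empty dict; Pre_func excludes ss = ""
  match PySem.List.min? d.values (fun v => v) with
  | none => ""
  | some min_cnt =>
    -- d[i] with i drawn from s always hits a key, so getD i 0 is exact here
    let res := s.foldl (fun res i => if d.getD i 0 ≠ min_cnt then res ++ [i] else res) []
    String.mk res

-- ===== PORT B =====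
-- one step of B's run-length loop: runs[0] is the run being grown (runs.insert(0, …) / runs[0] = …)
def bStep (runs : List (Char × Int)) (c : Char) : List (Char × Int) :=
  match runs with
  | (c0, n) :: rest => if c0 == c then (c, n + 1) :: rest else (c, 1) :: (c0, n) :: rest
  | [] => [(c, 1)]

def func_alt (ss : String) : String :=
  let runs := (PySem.List.sorted ss.toList (fun c => c) false).foldl bStep []
  -- min(n for _, n in runs) raises ValueError on an empty string, like A
  match PySem.List.min? (runs.map (fun p => p.2)) (fun v => v) with
  | none => ""
  | some min_cnt =>
    let rare := PySem.Set.ofList ((runs.filter (fun p => p.2 == min_cnt)).map (fun p => p.1))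
    String.mk (ss.toList.filter (fun c => !(PySem.Set.contains rare c)))

-- ===== PRECONDITION & SPEC =====
-- Pre_ excludes only the empty string, on which A raises ValueError (min of empty sequence); B raises there too.
def Pre_func (ss : String) : Prop := ss ≠ ""
instance (ss : String) : Decidable (Pre_func ss) := by unfold Pre_func; infer_instance
def pvWitness_func : String := "aab"
def Spec_func (ss : String) (out : String) : Prop := out = func_alt ss
instance (ss : String) (out : String) : Decidable (Spec_func ss out) := by unfold Spec_func; infer_instance

-- ===== CLAIM (what is proved, stated in full; the proofs are below) =====
def Claim_equal_func : Prop := ∀ (ss : String), Dom_func ss → Pre_func ss → Spec_func ss (func ss)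

-- ===== LEMMAS AND PROOFS =====

-- A's counting loop (branching on membership) builds exactly Counter(s)
lemma func_dict_eq_counter (s : List Char) :
    s.foldl (fun d i => if d.contains i then d.insert i (d.getD i 0 + 1) else d.insert i 1)
      (PySem.Dict.empty : PySem.Dict Char Int)
      = PySem.Dict.counter s := by
  rw [← PySem.Dict.foldl_insert_getD_add_one_eq_counter]
  apply PySem.List.foldl_congr_mem
  intro d i _
  by_cases h : d.contains i
  · simp [h]
  · simp only [h, Bool.false_eq_true, if_false]
    rw [PySem.Dict.getD_of_not_contains d 0 (by simpa using h)]
    norm_num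

-- ordered dedup of a list extended by one element
lemma dedup_append_singleton (l : List Char) (c : Char) :
    PySem.List.dedup (l ++ [c]) =
      if c ∈ l then PySem.List.dedup l else PySem.List.dedup l ++ [c] := by
  simp only [PySem.List.dedup_eq_ofList, PySem.Set.ofList_eq_foldl, List.foldl_append,
    List.foldl_cons, List.foldl_nil]
  rw [PySem.Set.add]
  rw [← PySem.Set.ofList_eq_foldl]
  have hm : PySem.Set.contains (PySem.Set.ofList l) c = decide (c ∈ l) := by
    simp [PySem.Set.contains, PySem.Set.mem_ofList]
  by_cases h : c ∈ l <;> simp [hm, h]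

-- PySem.List.dedup is a sublist, so it inherits Pairwise from the sorted list
lemma dedup_sublist (l : List Char) : (PySem.List.dedup l).Sublist l := by
  induction l using List.reverseRecOn with
  | nil => simp [PySem.List.dedup]
  | append_singleton l c ih =>
    rw [dedup_append_singleton]
    by_cases h : c ∈ l
    · simpa [h] using ih.trans (List.sublist_append_left l [c])
    · simpa [h] using List.Sublist.append ih (List.Sublist.refl [c])

-- B's run-length fold over a sorted list = reversed dedup paired with the counts
lemma runs_spec (l : List Char) (h : l.Pairwise (· ≤ ·)) :
    l.foldl bStep [] =
      (PySem.List.dedup l).reverse.map (fun c => (c, (l.count c : Int))) := by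
  induction l using List.reverseRecOn with
  | nil => simp [PySem.List.dedup]
  | append_singleton l c ih =>
    have hpl : l.Pairwise (· ≤ ·) := h.sublist (List.sublist_append_left l [c])
    have hmax : ∀ x ∈ l, x ≤ c := by
      intro x hx
      exact (List.pairwise_append.mp h).2.2 x hx c (by simp)
    rw [List.foldl_append, List.foldl_cons, List.foldl_nil, ih hpl, dedup_append_singleton]
    by_cases hc : c ∈ l
    · simp only [hc, if_true]
      have hcd : c ∈ PySem.List.dedup l := (PySem.List.mem_dedup l c).mpr hc
      cases hdl : (PySem.List.dedup l).reverse with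
      | nil =>
        exfalso
        have h0 : PySem.List.dedup l = [] := by simpa using congrArg List.reverse hdl
        rw [h0] at hcd
        simp at hcd
      | cons d ds =>
        have hdd : PySem.List.dedup l = ds.reverse ++ [d] := by
          have := congrArg List.reverse hdl
          simpa using this
        have hdmem : d ∈ l := by
          have hin : d ∈ PySem.List.dedup l := by rw [hdd]; simp
          exact (PySem.List.mem_dedup l d).mp hin
        have hcd2 : c = d := by
          have hsplit : c ∈ ds.reverse ∨ c = d := by
            rw [hdd] at hcd; simpa using hcd
          rcases hsplit with hcs | he
          · have hpd : (PySem.List.dedup l).Pairwise (· ≤ ·) :=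
              hpl.sublist (dedup_sublist l)
            rw [hdd] at hpd
            have hle : c ≤ d := (List.pairwise_append.mp hpd).2.2 c hcs d (by simp)
            exact le_antisymm hle (hmax d hdmem)
          · exact he
        subst hcd2
        have hnd : c ∉ ds := by
          have hnodup : (PySem.List.dedup l).Nodup := PySem.List.nodup_dedup l
          rw [hdd] at hnodup
          have h2 := List.nodup_append.mp hnodup
          intro hmem
          exact h2.2.2 c (List.mem_reverse.mpr hmem) c (List.mem_singleton_self c) rfl
        simp only [List.map_cons]
        simp only [bStep, beq_self_eq_true, if_true]
        refine congrArg₂ List.cons ?_ ?_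
        · have h1 : (l ++ [c]).count c = l.count c + 1 := by
            simp [List.count_append]
          rw [h1]
          push_cast
          ring_nf
        · apply List.map_congr_left
          intro x hx
          have hxc : x ≠ c := fun he => hnd (he ▸ hx)
          have h1 : (l ++ [c]).count x = l.count x := by
            simp [List.count_append, Ne.symm hxc]
          simp [h1]
    · simp only [hc, if_false]
      rw [List.reverse_append]
      simp only [List.reverse_singleton, List.singleton_append, List.map_cons]
      have hcnt1 : (l ++ [c]).count c = 1 := by
        simp [List.count_append, List.count_eq_zero_of_not_mem hc]
      have htail : ∀ x ∈ (PySem.List.dedup l).reverse,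
          (fun c' => (c', ((l ++ [c]).count c' : Int))) x
            = (fun c' => (c', (l.count c' : Int))) x := by
        intro x hx
        have hxl : x ∈ l := (PySem.List.mem_dedup l x).mp (by simpa using hx)
        have hxc : x ≠ c := fun he => hc (he ▸ hxl)
        have h1 : (l ++ [c]).count x = l.count x := by
          simp [List.count_append, Ne.symm hxc]
        simp [h1]
      rw [List.map_congr_left htail]
      cases hdl : (PySem.List.dedup l).reverse with
      | nil => simp [bStep, hcnt1]
      | cons d ds =>
        have hdmem : d ∈ l := by
          have hin : d ∈ PySem.List.dedup l := by
            have h0 : PySem.List.dedup l = ds.reverse ++ [d] := by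
              simpa using congrArg List.reverse hdl
            rw [h0]; simp
          exact (PySem.List.mem_dedup l d).mp hin
        have hdc : (d == c) = false := by
          simp only [beq_eq_false_iff_ne, ne_eq]
          intro he
          exact hc (he ▸ hdmem)
        simp [bStep, hdc, hcnt1]

-- min with the identity key depends only on the multiset of an Int list
lemma min?_id_perm (l l' : List Int) (hp : l.Perm l') :
    PySem.List.min? l (fun v => v) = PySem.List.min? l' (fun v => v) := by
  cases hl : PySem.List.min? l (fun v => v) with
  | none =>
    have h0 : l = [] := (PySem.List.min?_eq_none_iff l (fun v => v)).mp hl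
    subst h0
    have h1 : l' = [] := hp.symm.eq_nil
    rw [h1]; exact hl.symm
  | some m =>
    cases hl' : PySem.List.min? l' (fun v => v) with
    | none =>
      have h0 : l' = [] := (PySem.List.min?_eq_none_iff l' (fun v => v)).mp hl'
      subst h0
      have hm := PySem.List.min?_mem hl
      simp [hp.eq_nil] at hm
    | some m' =>
      have hm := PySem.List.min?_mem hl
      have hm' := PySem.List.min?_mem hl'
      have h1 := PySem.List.min?_isMin hl m' (hp.mem_iff.mpr hm')
      have h2 := PySem.List.min?_isMin hl' m (hp.mem_iff.mp hm)
      simp only [] at h1 h2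
      exact congrArg some (le_antisymm h1 h2)

lemma func_eq_alt (ss : String) : func ss = func_alt ss := by
  unfold func func_alt
  simp only [func_dict_eq_counter]
  have hpw : (PySem.List.sorted ss.toList (fun c => c) false).Pairwise (· ≤ ·) :=
    PySem.List.sorted_pairwise ss.toList (fun c => c)
  rw [runs_spec _ hpw]
  have hperm : (PySem.List.sorted ss.toList (fun c => c) false).Perm ss.toList :=
    PySem.List.sorted_perm ss.toList (fun c => c) false
  have hcount : ∀ x, (PySem.List.sorted ss.toList (fun c => c) false).count x
      = ss.toList.count x := fun x => hperm.count_eq x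
  have hdperm : (PySem.List.dedup (PySem.List.sorted ss.toList (fun c => c) false)).Perm
      (PySem.List.dedup ss.toList) := by
    refine (List.perm_ext_iff_of_nodup (PySem.List.nodup_dedup _) (PySem.List.nodup_dedup _)).mpr ?_
    intro x
    rw [PySem.List.mem_dedup, PySem.List.mem_dedup, PySem.List.mem_sorted]
  have hvalperm :
      (((PySem.List.dedup (PySem.List.sorted ss.toList (fun c => c) false)).reverse.map
          (fun c => (c, ((PySem.List.sorted ss.toList (fun c => c) false).count c : Int)))).map
            (fun p => p.2)).Perm
        (PySem.Dict.counter ss.toList).values := by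
    rw [List.map_map]
    have hcomp : ((fun p => p.2) ∘ fun c => (c, ((PySem.List.sorted ss.toList (fun c => c) false).count c : Int)))
        = fun c => (ss.toList.count c : Int) := by
      funext c; simp [hcount]
    rw [hcomp]
    have hv : (PySem.Dict.counter ss.toList).values
        = (PySem.Set.ofList ss.toList).map (fun k => (ss.toList.count k : Int)) := by
      have := PySem.Dict.items_counter ss.toList
      simp only [PySem.Dict.values, this, List.map_map]
      rfl
    rw [hv, ← PySem.List.dedup_eq_ofList]
    exact ((List.reverse_perm _).trans hdperm).map _
  rw [min?_id_perm _ _ hvalperm]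
  cases hmin : PySem.List.min? (PySem.Dict.counter ss.toList).values (fun v => v) with
  | none => rfl
  | some m =>
    simp only []
    congr 1
    rw [PySem.List.foldl_append_ite_eq_filter]
    simp only [List.nil_append]
    apply List.filter_congr
    intro c hcmem
    have hin : c ∈ PySem.List.dedup (PySem.List.sorted ss.toList (fun c => c) false) := by
      rw [PySem.List.mem_dedup, PySem.List.mem_sorted]; exact hcmem
    have hcontains : PySem.Set.contains
        (PySem.Set.ofList
          (((( PySem.List.dedup (PySem.List.sorted ss.toList (fun c => c) false)).reverse.map
              (fun c => (c, ((PySem.List.sorted ss.toList (fun c => c) false).count c : Int)))).filter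
                (fun p => p.2 == m)).map (fun p => p.1))) c
        = decide ((ss.toList.count c : Int) = m) := by
      show List.contains _ c = _
      rw [List.contains_eq_mem]
      by_cases hq : (ss.toList.count c : Int) = m
      · simp only [hq, decide_true]
        apply decide_eq_true
        rw [PySem.Set.mem_ofList]
        refine List.mem_map.mpr ⟨(c, ((PySem.List.sorted ss.toList (fun c => c) false).count c : Int)), List.mem_filter.mpr ⟨List.mem_map.mpr ⟨c, List.mem_reverse.mpr hin, rfl⟩, by simp [hcount, hq]⟩, rfl⟩
      · simp only [hq, decide_false]
        apply decide_eq_false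
        intro hmem0
        rw [PySem.Set.mem_ofList] at hmem0
        rcases List.mem_map.mp hmem0 with ⟨⟨x, n⟩, hpair, hx⟩
        rcases List.mem_filter.mp hpair with ⟨hmem, hn⟩
        rcases List.mem_map.mp hmem with ⟨y, _, hy⟩
        cases hy
        simp only at hx
        simp only [beq_iff_eq] at hn
        exact hq (by rw [← hx, ← hcount]; exact hn)
    rw [PySem.Dict.getD_counter]
    rw [hcontains]
    by_cases hq : (ss.toList.count c : Int) = m <;> simp [hq]

-- ===== VERDICT (by name: the statement is the Claim_ definition above) =====
theorem func_spec : Claim_equal_func := by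
  intro ss _ _
  exact func_eq_alt ss
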